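-- pv_equiv track=rewrite | github.com/waiyangar572/bridge-dds-app | backend/exact_probability_engine.py | _spot_allocations
-- ===== SOURCE A (Python) =====
-- from typing import Dict, Iterable, Iterator, Mapping, Sequence, Tuple
--
-- def _spot_allocations(vacant_spaces: Sequence[int], total: int) -> Iterator[Tuple[int, int, int, int]]:
--     for north in range(min(vacant_spaces[0], total) + 1):
--         rem_n = total - north
--         for south in range(min(vacant_spaces[1], rem_n) + 1):
--             rem_ns = rem_n - south
--             low_east = max(0, rem_ns - vacant_spaces[3])
--             high_east = min(vacant_spaces[2], rem_ns)
--             for east in range(low_east, high_east + 1):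
--                 west = rem_ns - east
--                 if west <= vacant_spaces[3]:
--                     yield north, south, east, west
-- ===== SOURCE B (Python) =====
-- def _spot_allocations(vacant_spaces, total):
--     # Distribute `remaining` cards hand by hand (index 0..3) by recursion: hand i takes k
--     # in [max(0, remaining - later capacity), min(own capacity, remaining)]; the last hand
--     # gets the forced remainder if it fits.
--     rest = [vacant_spaces[1] + vacant_spaces[2] + vacant_spaces[3],
--             vacant_spaces[2] + vacant_spaces[3],
--             vacant_spaces[3]]
--     def go(i, remaining, acc):
--         if i < 3:
--             lo = max(0, remaining - rest[i])
--             hi = min(vacant_spaces[i], remaining)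
--             for k in range(lo, hi + 1):
--                 yield from go(i + 1, remaining - k, acc + (k,))
--         else:
--             if 0 <= remaining <= vacant_spaces[3]:
--                 yield acc + (remaining,)
--     yield from go(0, total, ())
-- ===== Notes on version B (the rewrite author's own statement) =====
-- stated objective: alternative
-- what changed: Replaced the three hard-coded nested loops (which prune only the east range) by a single recursive distributor over the hand index that prunes every hand's range with precomputed suffix capacities; the last hand takes the forced remainder.
-- outside the precondition, e.g. on _spot_allocations([5], -1): A returns [], B raises IndexError
import Mathlib
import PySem

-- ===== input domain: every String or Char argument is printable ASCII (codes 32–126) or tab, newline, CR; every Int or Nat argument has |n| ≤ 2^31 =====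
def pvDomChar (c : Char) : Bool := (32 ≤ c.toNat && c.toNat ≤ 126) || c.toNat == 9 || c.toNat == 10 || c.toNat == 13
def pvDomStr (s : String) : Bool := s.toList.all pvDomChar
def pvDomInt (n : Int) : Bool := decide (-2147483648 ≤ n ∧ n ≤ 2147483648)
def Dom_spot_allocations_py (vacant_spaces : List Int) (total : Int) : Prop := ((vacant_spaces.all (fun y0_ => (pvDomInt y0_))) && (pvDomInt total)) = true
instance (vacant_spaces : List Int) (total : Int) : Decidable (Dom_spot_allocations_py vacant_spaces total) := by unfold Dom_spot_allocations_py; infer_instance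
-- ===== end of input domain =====

-- B replaces A's three hard-coded nested loops by one recursive distributor over the hand
-- index with suffix-capacity pruning at every hand; alternative decomposition, same output order.


-- ===== PORT A =====
def spot_allocations_py (vacant_spaces : List Int) (total : Int) : List (Int × Int × Int × Int) :=
  (PySem.List.pyRange 0 (min (PySem.List.pyGetD vacant_spaces 0 0) total + 1) 1).foldl
    (fun acc north =>
      let rem_n := total - north
      acc ++ (PySem.List.pyRange 0 (min (PySem.List.pyGetD vacant_spaces 1 0) rem_n + 1) 1).foldl
        (fun acc2 south =>
          let rem_ns := rem_n - south
          let low_east := max 0 (rem_ns - PySem.List.pyGetD vacant_spaces 3 0)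
          let high_east := min (PySem.List.pyGetD vacant_spaces 2 0) rem_ns
          acc2 ++ (PySem.List.pyRange low_east (high_east + 1) 1).foldl
            (fun acc3 east =>
              let west := rem_ns - east
              if west ≤ PySem.List.pyGetD vacant_spaces 3 0 then
                acc3 ++ [(north, south, east, west)]
              else acc3) []) []) []

-- ===== PORT B =====
def pvAltGo (vacant_spaces rest : List Int) (i : Nat) (remaining : Int) (acc : List Int) :
    List (Int × Int × Int × Int) :=
  if _h : i < 3 then
    (PySem.List.pyRange (max 0 (remaining - PySem.List.pyGetD rest (i : Int) 0))
        (min (PySem.List.pyGetD vacant_spaces (i : Int) 0) remaining + 1) 1).foldl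
      (fun out k => out ++ pvAltGo vacant_spaces rest (i + 1) (remaining - k) (acc ++ [k])) []
  else
    if 0 ≤ remaining ∧ remaining ≤ PySem.List.pyGetD vacant_spaces 3 0 then
      match acc with
      | [n, s, e] => [(n, s, e, remaining)]
      | _ => []
    else []
termination_by 3 - i

def spot_allocations_py_alt (vacant_spaces : List Int) (total : Int) : List (Int × Int × Int × Int) :=
  let rest := [PySem.List.pyGetD vacant_spaces 1 0 + PySem.List.pyGetD vacant_spaces 2 0 +
                 PySem.List.pyGetD vacant_spaces 3 0,
               PySem.List.pyGetD vacant_spaces 2 0 + PySem.List.pyGetD vacant_spaces 3 0,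
               PySem.List.pyGetD vacant_spaces 3 0]
  pvAltGo vacant_spaces rest 0 total []

-- ===== PRECONDITION & SPEC =====
-- Pre_ excludes lists shorter than 4: A raises IndexError there except when its loops are
-- vacuously empty (then it returns []); B indexes all four capacities up front and raises.
def Pre_spot_allocations_py (vacant_spaces : List Int) (total : Int) : Prop :=
  4 ≤ vacant_spaces.length
instance (vacant_spaces : List Int) (total : Int) : Decidable (Pre_spot_allocations_py vacant_spaces total) := by unfold Pre_spot_allocations_py; infer_instance
def pvWitness_spot_allocations_py : List Int × Int := ([2, 1, 1, 1], 3)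

def Spec_spot_allocations_py (vacant_spaces : List Int) (total : Int) (out : List (Int × Int × Int × Int)) : Prop := out = spot_allocations_py_alt vacant_spaces total
instance (vacant_spaces : List Int) (total : Int) (out : List (Int × Int × Int × Int)) : Decidable (Spec_spot_allocations_py vacant_spaces total out) := by unfold Spec_spot_allocations_py; infer_instance

-- ===== CLAIM (what is proved, stated in full; the proofs are below) =====
def Claim_equal_spot_allocations_py : Prop := ∀ (vacant_spaces : List Int) (total : Int), Dom_spot_allocations_py vacant_spaces total → Pre_spot_allocations_py vacant_spaces total → Spec_spot_allocations_py vacant_spaces total (spot_allocations_py vacant_spaces total)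

-- ===== LEMMAS AND PROOFS =====

-- flatMap that yields [] on every member is []
theorem pv_flatMap_nil {α β : Type} (l : List α) (g : α → List β)
    (h : ∀ x ∈ l, g x = []) : l.flatMap g = [] := by
  simp [List.flatMap_eq_nil_iff]; exact h

-- flatMap that yields a singleton on every member is a map
theorem pv_flatMap_map {α β : Type} (l : List α) (g : α → List β) (f : α → β)
    (h : ∀ x ∈ l, g x = [f x]) : l.flatMap g = l.map f := by
  induction l with
  | nil => rfl
  | cons a t ih =>
      simp only [List.flatMap_cons, List.map_cons, h a (by simp),
        ih (fun x hx => h x (by simp [hx]))]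
      rfl

-- indexing B's literal suffix-capacity list
theorem pvRest_get0 (a b c : Int) : PySem.List.pyGetD [a, b, c] ((0 : Nat) : Int) 0 = a := rfl
theorem pvRest_get1 (a b c : Int) : PySem.List.pyGetD [a, b, c] ((1 : Nat) : Int) 0 = b := rfl
theorem pvRest_get2 (a b c : Int) : PySem.List.pyGetD [a, b, c] ((2 : Nat) : Int) 0 = c := rfl
theorem pvRest_get2' (a b c : Int) : PySem.List.pyGetD [a, b, c] 2 0 = c := rfl

-- base of B's recursion
theorem pvAltGo_three (vs rest : List Int) (rem : Int) (n s e : Int) :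
    pvAltGo vs rest 3 rem [n, s, e] =
      if 0 ≤ rem ∧ rem ≤ PySem.List.pyGetD vs 3 0 then [(n, s, e, rem)] else [] := by
  rw [pvAltGo.eq_def, dif_neg (by omega)]

-- step of B's recursion, as a flatMap
theorem pvAltGo_step (vs rest : List Int) (i : Nat) (hi : i < 3) (rem : Int) (acc : List Int) :
    pvAltGo vs rest i rem acc =
      (PySem.List.pyRange (max 0 (rem - PySem.List.pyGetD rest (i : Int) 0))
          (min (PySem.List.pyGetD vs (i : Int) 0) rem + 1) 1).flatMap
        (fun k => pvAltGo vs rest (i + 1) (rem - k) (acc ++ [k])) := by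
  rw [pvAltGo.eq_def, dif_pos hi, PySem.List.foldl_append_eq_flatMap]
  exact List.nil_append _

-- hand 2 cannot absorb more than its and the last hand's capacity
theorem pvE2 (vs : List Int) (r0 : Int) (rem : Int) (acc : List Int)
    (h : PySem.List.pyGetD vs 2 0 + PySem.List.pyGetD vs 3 0 < rem) :
    pvAltGo vs [r0, PySem.List.pyGetD vs 2 0 + PySem.List.pyGetD vs 3 0,
        PySem.List.pyGetD vs 3 0] 2 rem acc = [] := by
  rw [pvAltGo_step _ _ 2 (by omega), pvRest_get2]
  simp only [Nat.cast_ofNat]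
  rw [PySem.List.pyRange_one_eq_nil (by omega)]
  rfl

-- hand 1 cannot absorb more than the remaining three hands' capacity
theorem pvE1 (vs : List Int) (rem : Int) (acc : List Int)
    (h : PySem.List.pyGetD vs 1 0 + PySem.List.pyGetD vs 2 0 + PySem.List.pyGetD vs 3 0 < rem) :
    pvAltGo vs [PySem.List.pyGetD vs 1 0 + PySem.List.pyGetD vs 2 0 + PySem.List.pyGetD vs 3 0,
        PySem.List.pyGetD vs 2 0 + PySem.List.pyGetD vs 3 0,
        PySem.List.pyGetD vs 3 0] 1 rem acc = [] := by
  rw [pvAltGo_step _ _ 1 (by omega), pvRest_get1]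
  simp only [Nat.cast_one]
  rw [PySem.List.pyRange_one_eq_nil (by omega)]
  rfl

-- a lower-bound prune of a range is invisible when the pruned prefix yields nothing
theorem pv_prune {α : Type} (b t : Int) (g : Int → List α)
    (hnil : ∀ k, 0 ≤ k → k < max 0 b → g k = []) :
    (PySem.List.pyRange 0 t 1).flatMap g = (PySem.List.pyRange (max 0 b) t 1).flatMap g := by
  by_cases h2 : t ≤ max 0 b
  · rw [PySem.List.pyRange_one_eq_nil h2,
      pv_flatMap_nil _ g (fun k hk => by
        have hm := (PySem.List.mem_pyRange_one).1 hk
        exact hnil k (by omega) (by omega))]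
    rfl
  · rw [PySem.List.pyRange_one_append 0 (max 0 b) t (by omega) (by omega), List.flatMap_append,
      pv_flatMap_nil _ g (fun k hk => by
        have hm := (PySem.List.mem_pyRange_one).1 hk
        exact hnil k (by omega) (by omega)),
      List.nil_append]

-- ===== VERDICT (by name: the statement is the Claim_ definition above) =====
theorem spot_allocations_py_spec : Claim_equal_spot_allocations_py := by
  intro vs total _ _
  show spot_allocations_py vs total = spot_allocations_py_alt vs total
  unfold spot_allocations_py spot_allocations_py_alt
  simp only [PySem.List.foldl_append_eq_flatMap, List.nil_append]
  rw [pvAltGo_step _ _ 0 (by omega), pvRest_get0, Nat.cast_zero,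
    ← pv_prune (total - (PySem.List.pyGetD vs 1 0 + PySem.List.pyGetD vs 2 0 +
        PySem.List.pyGetD vs 3 0)) _ _
      (fun k hk0 hklt => pvE1 vs (total - k) _ (by omega))]
  refine List.flatMap_congr (fun north hn => ?_)
  simp only [List.nil_append]
  rw [pvAltGo_step _ _ 1 (by omega), pvRest_get1, Nat.cast_one,
    ← pv_prune (total - north - (PySem.List.pyGetD vs 2 0 + PySem.List.pyGetD vs 3 0)) _ _
      (fun k hk0 hklt => pvE2 vs _ (total - north - k) _ (by omega))]
  refine List.flatMap_congr (fun south hs => ?_)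
  rw [pvAltGo_step _ _ (1 + 1) (by omega)]
  simp only [Nat.reduceAdd, Nat.cast_ofNat, pvRest_get2', List.cons_append, List.nil_append,
    pvAltGo_three, PySem.List.foldl_append_ite]
  rw [List.filter_eq_self.2 (fun e he => by
      have hm := (PySem.List.mem_pyRange_one).1 he
      simp only [decide_eq_true_eq]; omega),
    pv_flatMap_map _ _ (fun e => (north, south, e, total - north - south - e)) (fun e he => by
      have hm := (PySem.List.mem_pyRange_one).1 he
      rw [if_pos (by omega)])]
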